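-- pv_equiv track=rewrite | github.com/balisujohn/mltests | python_neuro_ev/utils.py | extract_output_modes
-- ===== SOURCE A (Python) =====
-- def extract_output_modes(output):
-- 	result = [0]  * len(output[0])
-- 	for i in range(len(output[0])):
-- 		ones = 0
-- 		zeros = 0
-- 		for c in range(len(output)):
-- 			if output[c][i] == 1:
-- 				ones += 1
-- 			else:
-- 				zeros += 1
-- 		if ones >= zeros:
-- 			result[i] = 1
-- 		else:
-- 			result[i] = 0
-- 	return result
-- ===== SOURCE B (Python) =====
-- def extract_output_modes(output):
--     mid = len(output) // 2
--     return [sorted(1 if row[j] == 1 else 0 for row in output)[mid]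
--             for j in range(len(output[0]))]
-- ===== Notes on version B (the rewrite author's own statement) =====
-- stated objective: alternative
-- what changed: Replaced A's per-column ones/zeros counting and ones>=zeros comparison by an order-statistic algorithm: map each column to its 0/1 indicator list, sort it, and take the median element at index len(output)//2, which realizes the majority-with-tie-to-1 rule without any counting or threshold test.
import Mathlib
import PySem

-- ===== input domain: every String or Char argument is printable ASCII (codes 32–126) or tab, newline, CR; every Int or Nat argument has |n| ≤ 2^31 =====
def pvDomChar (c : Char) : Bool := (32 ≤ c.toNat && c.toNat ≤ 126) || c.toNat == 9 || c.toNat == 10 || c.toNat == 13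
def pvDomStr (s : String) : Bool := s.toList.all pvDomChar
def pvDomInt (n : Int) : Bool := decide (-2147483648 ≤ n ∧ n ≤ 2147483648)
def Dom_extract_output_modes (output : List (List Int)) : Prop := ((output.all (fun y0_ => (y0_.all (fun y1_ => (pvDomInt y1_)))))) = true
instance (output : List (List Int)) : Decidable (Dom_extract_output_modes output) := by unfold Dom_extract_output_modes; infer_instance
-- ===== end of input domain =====

-- B replaces A's per-column ones/zeros counting and threshold comparison by an
-- order-statistic algorithm: sort each column's 0/1 indicators and take the
-- median element at index len(output)//2 (objective: alternative, same task).

-- ===== PORT A =====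
def extract_output_modes (output : List (List Int)) : List Int :=
  let result := List.replicate (PySem.List.pyGetD output 0 ([] : List Int)).length (0 : Int)
  (PySem.List.pyRange 0 ((PySem.List.pyGetD output 0 ([] : List Int)).length) 1).foldl
    (fun result i =>
      let oz : Int × Int :=
        (PySem.List.pyRange 0 (output.length) 1).foldl
          (fun (oz : Int × Int) c =>
            if PySem.List.pyGetD (PySem.List.pyGetD output c ([] : List Int)) i (0 : Int) == 1 then
              (oz.1 + 1, oz.2)
            else
              (oz.1, oz.2 + 1))
          (0, 0)
      if oz.1 ≥ oz.2 then PySem.List.pySetD result i 1 else PySem.List.pySetD result i 0)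
    result

-- ===== PORT B =====
def extract_output_modes_alt (output : List (List Int)) : List Int :=
  let mid : ℕ := output.length / 2
  (PySem.List.pyRange 0 ((PySem.List.pyGetD output 0 ([] : List Int)).length) 1).map
    (fun j =>
      PySem.List.pyGetD
        (PySem.List.sorted
          (output.map (fun row => if PySem.List.pyGetD row j (0 : Int) == 1 then (1 : Int) else 0))
          (fun x => x) false)
        (mid : Int) 0)

-- ===== PRECONDITION & SPEC =====
-- Pre_ excludes exactly the inputs where the Python A raises IndexError:
-- the empty list (output[0]) and inputs where some row is shorter than the first row.
def Pre_extract_output_modes (output : List (List Int)) : Prop :=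
  output ≠ [] ∧ ∀ row ∈ output, (output.headD []).length ≤ row.length
instance (output : List (List Int)) : Decidable (Pre_extract_output_modes output) := by
  unfold Pre_extract_output_modes; infer_instance

def pvWitness_extract_output_modes : List (List Int) := [[1, 0], [0, 0], [1, 1]]

def Spec_extract_output_modes (output : List (List Int)) (out : List Int) : Prop :=
  out = extract_output_modes_alt output
instance (output : List (List Int)) (out : List Int) : Decidable (Spec_extract_output_modes output out) := by
  unfold Spec_extract_output_modes; infer_instance

-- ===== CLAIM (what is proved, stated in full; the proofs are below) =====
def Claim_equal_extract_output_modes : Prop :=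
  ∀ (output : List (List Int)), Dom_extract_output_modes output →
    Pre_extract_output_modes output →
    Spec_extract_output_modes output (extract_output_modes output)

-- ===== LEMMAS AND PROOFS =====

theorem pv_replicate_eq_map_range (m : ℕ) :
    List.replicate m (0 : Int) = (List.range m).map (fun _ => (0 : Int)) := by
  apply List.ext_getElem <;> simp

-- A's outer loop: writing a value depending only on the index into a fresh array is a map
theorem pv_foldl_set_range (g : Int → Int) :
    ∀ (n : ℕ) (xs : List Int), n ≤ xs.length →
      (PySem.List.pyRange 0 n 1).foldl (fun res i => PySem.List.pySetD res i (g i)) xs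
        = (List.range n).map (fun (k : ℕ) => g (k : Int)) ++ xs.drop n := by
  intro n
  induction n with
  | zero => intro xs _; simp [PySem.List.pyRange_one_eq_nil]
  | succ n ih =>
    intro xs h
    push_cast
    rw [PySem.List.pyRange_one_succ_right (by positivity), List.foldl_append,
      ih xs (by omega)]
    simp only [List.foldl_cons, List.foldl_nil, PySem.List.pySetD_natCast]
    have hd : xs.drop n = xs[n] :: xs.drop (n + 1) :=
      List.drop_eq_getElem_cons (by omega)
    have hlen1 : ((List.range n).map (fun (k : ℕ) => g (k : Int))).length = n := by simp
    rw [List.set_append, hlen1, if_neg (lt_irrefl n), Nat.sub_self, hd,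
      List.set_cons_zero, List.range_succ, List.map_append]
    simp

-- A's inner loop computes (ones, zeros) = (count of 1s in column i, rest)
theorem pv_inner_fold (output : List (List Int)) (i : Int) :
    (PySem.List.pyRange 0 (output.length) 1).foldl
      (fun (oz : Int × Int) c =>
        if PySem.List.pyGetD (PySem.List.pyGetD output c ([] : List Int)) i (0 : Int) == 1 then
          (oz.1 + 1, oz.2)
        else
          (oz.1, oz.2 + 1))
      ((0 : Int), (0 : Int))
    = ((output.countP (fun row => PySem.List.pyGetD row i 0 == 1) : Int),
       (output.countP (fun row => !(PySem.List.pyGetD row i 0 == 1)) : Int)) := by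
  rw [PySem.List.foldl_pyRange_zero_pyGetD' output ([] : List Int)
    (fun (oz : Int × Int) row =>
      if PySem.List.pyGetD row i (0 : Int) == 1 then (oz.1 + 1, oz.2) else (oz.1, oz.2 + 1))
    ((0 : Int), (0 : Int))]
  have hfg : (fun (oz : Int × Int) row =>
      if PySem.List.pyGetD row i (0 : Int) == 1 then (oz.1 + 1, oz.2) else (oz.1, oz.2 + 1))
      = fun (oz : Int × Int) row =>
      ((if PySem.List.pyGetD row i (0 : Int) == 1 then oz.1 + 1 else oz.1),
       (if !(PySem.List.pyGetD row i (0 : Int) == 1) then oz.2 + 1 else oz.2)) := by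
    funext oz row
    by_cases h : PySem.List.pyGetD row i (0 : Int) == 1 <;> simp [h]
  rw [hfg]
  rw [PySem.List.foldl_prod_mk
    (f := fun acc row => if PySem.List.pyGetD row i (0 : Int) == 1 then acc + 1 else acc)
    (g := fun acc row => if !(PySem.List.pyGetD row i (0 : Int) == 1) then acc + 1 else acc)]
  rw [PySem.List.foldl_if_add_one, PySem.List.foldl_if_add_one]
  simp

-- a 0/1 list is a permutation of its zeros followed by its ones
theorem pv_perm_zeros_ones (bits : List Int) (h : ∀ x ∈ bits, x = 0 ∨ x = 1) :
    (List.replicate (bits.countP (· == (0 : Int))) (0 : Int)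
      ++ List.replicate (bits.countP (· == (1 : Int))) (1 : Int)).Perm bits := by
  induction bits with
  | nil => simp
  | cons x bits ih =>
    have hx := h x (by simp)
    have ih' := ih (fun y hy => h y (by simp [hy]))
    rcases hx with hx | hx
    · subst hx
      simp only [List.countP_cons, BEq.rfl, if_pos, show ((0:Int) == 1) = false by decide,
        if_neg, Bool.false_eq_true, not_false_eq_true, List.replicate_succ, List.cons_append]
      exact ih'.cons 0
    · subst hx
      simp only [List.countP_cons, BEq.rfl, show ((1:Int) == 0) = false by decide,
        Bool.false_eq_true, not_false_eq_true, if_neg, if_pos, List.replicate_succ]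
      exact List.perm_middle.trans (ih'.cons 1)

-- sorting a 0/1 list puts all zeros before all ones
theorem pv_sorted_bits (bits : List Int) (h : ∀ x ∈ bits, x = 0 ∨ x = 1) :
    PySem.List.sorted bits (fun x => x) false
      = List.replicate (bits.countP (· == (0 : Int))) (0 : Int)
        ++ List.replicate (bits.countP (· == (1 : Int))) (1 : Int) := by
  apply PySem.List.sorted_id_eq_of_perm_of_pairwise
  · exact pv_perm_zeros_ones bits h
  · refine List.pairwise_append.mpr ⟨List.pairwise_replicate.mpr (Or.inr le_rfl),
      List.pairwise_replicate.mpr (Or.inr le_rfl), ?_⟩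
    intro a ha b hb
    rw [List.eq_of_mem_replicate ha, List.eq_of_mem_replicate hb]
    decide

-- ===== VERDICT (by name: the statement is the Claim_ definition above) =====
theorem extract_output_modes_spec : Claim_equal_extract_output_modes := by
  intro output _ hpre
  obtain ⟨hne, hlen⟩ := hpre
  unfold Spec_extract_output_modes
  simp only [extract_output_modes, extract_output_modes_alt]
  set m := (PySem.List.pyGetD output 0 ([] : List Int)).length with hm
  have hfun :
      (fun (result : List Int) (i : Int) =>
        let oz : Int × Int :=
          (PySem.List.pyRange 0 (output.length) 1).foldl
            (fun (oz : Int × Int) c =>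
              if PySem.List.pyGetD (PySem.List.pyGetD output c ([] : List Int)) i (0 : Int) == 1 then
                (oz.1 + 1, oz.2)
              else (oz.1, oz.2 + 1)) (0, 0)
        if oz.1 ≥ oz.2 then PySem.List.pySetD result i 1 else PySem.List.pySetD result i 0)
      = fun result i => PySem.List.pySetD result i
          (if (output.countP (fun row => PySem.List.pyGetD row i 0 == 1) : Int)
              ≥ (output.countP (fun row => !(PySem.List.pyGetD row i 0 == 1)) : Int)
           then 1 else 0) := by
    funext result i
    simp only [pv_inner_fold]
    split_ifs <;> rfl
  rw [pv_replicate_eq_map_range m, hfun,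
    pv_foldl_set_range
      (fun i => if (output.countP (fun row => PySem.List.pyGetD row i 0 == 1) : Int)
          ≥ (output.countP (fun row => !(PySem.List.pyGetD row i 0 == 1)) : Int)
        then 1 else 0)
      m ((List.range m).map fun _ => (0 : Int)) (by simp)]
  rw [List.drop_eq_nil_of_le (by simp), List.append_nil,
    PySem.List.pyRange_zero_nat m, List.map_map]
  apply List.map_congr_left
  intro k hk
  simp only [Function.comp_apply]
  -- B's column value at index k
  set bits := output.map
    (fun row => if PySem.List.pyGetD row (k : Int) (0 : Int) == 1 then (1 : Int) else 0) with hbits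
  have hball : ∀ x ∈ bits, x = 0 ∨ x = 1 := by
    intro x hx
    rw [hbits, List.mem_map] at hx
    obtain ⟨row, _, hrow⟩ := hx
    split at hrow <;> omega
  rw [pv_sorted_bits bits hball]
  have hc1 : bits.countP (· == (1 : Int))
      = output.countP (fun row => PySem.List.pyGetD row (k : Int) 0 == 1) := by
    rw [hbits, List.countP_map]
    apply List.countP_congr
    intro row _
    by_cases hc : PySem.List.pyGetD row (k : Int) (0 : Int) == 1 <;> simp [hc]
  have hc0 : bits.countP (· == (0 : Int))
      = output.countP (fun row => !(PySem.List.pyGetD row (k : Int) 0 == 1)) := by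
    rw [hbits, List.countP_map]
    apply List.countP_congr
    intro row _
    by_cases hc : PySem.List.pyGetD row (k : Int) (0 : Int) == 1 <;> simp [hc]
  rw [hc0, hc1]
  set c := output.countP (fun row => PySem.List.pyGetD row (k : Int) 0 == 1) with hcdef
  set z := output.countP (fun row => !(PySem.List.pyGetD row (k : Int) 0 == 1)) with hzdef
  have hsum : output.length = c + z := by
    rw [hcdef, hzdef,
      List.length_eq_countP_add_countP (p := fun row => PySem.List.pyGetD row (k : Int) 0 == 1)]
    congr 1
    apply List.countP_congr
    intro row _
    simp
  have hnpos : 0 < output.length := List.length_pos_of_ne_nil hne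
  rw [PySem.List.pyGetD_natCast]
  by_cases hmid : output.length / 2 < z
  · rw [List.getD_eq_getElem?_getD, List.getElem?_append_left (by simpa using hmid),
      List.getElem?_replicate_of_lt hmid]
    simp only [Option.getD_some]
    rw [if_neg]
    intro hge
    have : z ≤ c := by exact_mod_cast hge
    omega
  · rw [not_lt] at hmid
    rw [List.getD_eq_getElem?_getD, List.getElem?_append_right (by simpa using hmid)]
    have hlt : output.length / 2 - z < c := by omega
    rw [List.length_replicate, List.getElem?_replicate_of_lt hlt]
    simp only [Option.getD_some]
    rw [if_pos]
    have : z ≤ c := by omega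
    exact_mod_cast this
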